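-- pv_equiv track=rewrite | github.com/prash-kr-meena/GoogleR | Array/Others/Lexicographically_Smaller_Subsequence_of_Size_K/Most_Competitive_Subsequence__Monotonic_Increasing_Stack.py | find_lexicographically_smaller_subsequence_of_size_k
-- ===== SOURCE A (Python) =====
-- from typing import List
--
-- def find_lexicographically_smaller_subsequence_of_size_k(arr: List[int], k: int) -> List[int]:
--     n = len(arr)
--     no_of_elements_to_be_removed = n - k
--
--     stack = []  # stack.append(), stack.pop(), stack[-1]
--
--     for element in arr:
--         if len(stack) == 0:  # empty
--             stack.append(element)
--             continue
--
--         # before putting any element at the top, check if the top is larger then this element, and remove all of them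
--         while len(stack) != 0 and stack[-1] > element and no_of_elements_to_be_removed != 0:
--             stack.pop()
--             no_of_elements_to_be_removed -= 1  # update
--
--         # and finally push it to stack, after you have removed or even if there was nothing to be removed
--         stack.append(element)
--
--     while len(stack) != 0 and no_of_elements_to_be_removed != 0:
--         stack.pop()  # Remove all the un-removed extra elements from the stack top
--         no_of_elements_to_be_removed -= 1
--
--     # push all the stack elements to a list,
--     result = []
--     while len(stack) != 0:
--         result.append(stack.pop())
--
--     # These elements will be reverse order from what we require, so reverse the final result
--     result.reverse()
--     return result
-- ===== SOURCE B (Python) =====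
-- from typing import List
--
-- def find_lexicographically_smaller_subsequence_of_size_k(arr: List[int], k: int) -> List[int]:
--     # Greedy window-minimum selection, answered with a sparse table (binary lifting):
--     # table[j][i] is the index of the leftmost minimum of arr[i : i + 2**j], so each
--     # slot's window minimum is found by combining two overlapping power-of-two blocks.
--     n = len(arr)
--     if k <= 0 or k > n:
--         return []
--     table = [list(range(n))]
--     size = 1
--     while 2 * size <= n:
--         prev = table[-1]
--         table.append([prev[i] if arr[prev[i]] <= arr[prev[i + size]] else prev[i + size]
--                       for i in range(n - 2 * size + 1)])
--         size *= 2
--     result = []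
--     start = 0
--     for i in range(k):
--         lo, hi = start, n - k + i + 1
--         j = (hi - lo).bit_length() - 1
--         w = 1 << j
--         a = table[j][lo]
--         b = table[j][hi - w]
--         m = a if arr[a] <= arr[b] else b   # leftmost minimum of arr[lo:hi]
--         result.append(arr[m])
--         start = m + 1
--     return result
-- ===== Notes on version B (the rewrite author's own statement) =====
-- stated objective: alternative
-- what changed: Replaces the monotonic-stack-with-removal-budget pass by greedy window-minimum selection: a sparse table (binary lifting) of leftmost-minimum indices is built once, then each of the k output slots takes the leftmost minimum of its feasible window arr[start:n-k+i+1] and advances start past it.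
import Mathlib
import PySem

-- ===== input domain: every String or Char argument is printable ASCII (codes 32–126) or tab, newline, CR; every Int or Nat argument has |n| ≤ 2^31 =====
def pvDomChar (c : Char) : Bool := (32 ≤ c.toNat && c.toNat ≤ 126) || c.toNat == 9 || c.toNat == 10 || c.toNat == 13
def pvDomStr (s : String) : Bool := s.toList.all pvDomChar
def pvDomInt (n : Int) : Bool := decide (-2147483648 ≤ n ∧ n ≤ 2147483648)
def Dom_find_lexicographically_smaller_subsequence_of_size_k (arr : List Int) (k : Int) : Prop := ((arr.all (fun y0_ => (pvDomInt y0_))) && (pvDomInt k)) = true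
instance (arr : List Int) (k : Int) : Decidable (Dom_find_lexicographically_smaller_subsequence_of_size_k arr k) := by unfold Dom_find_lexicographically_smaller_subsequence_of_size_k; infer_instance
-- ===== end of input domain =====

-- B replaces A's monotonic-stack-with-removal-budget pass by a recursive greedy
-- window-minimum selection (alternative algorithm, return value proved equal for all inputs).

-- ===== PORT A =====
-- the inner while loop: pop while top > element and the removal budget is nonzero
-- (stack is stored head = top)
def pvPopWhile (stack : List Int) (r : Int) (e : Int) : List Int × Int :=
  match stack with
  | [] => ([], r)
  | t :: rest => if t > e ∧ r ≠ 0 then pvPopWhile rest (r - 1) e else (t :: rest, r)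

-- one iteration of the `for element in arr` loop
def pvStep (st : List Int × Int) (e : Int) : List Int × Int :=
  if st.1 = [] then (e :: st.1, st.2)
  else
    let p := pvPopWhile st.1 st.2 e
    (e :: p.1, p.2)

-- the final `while stack and budget != 0: stack.pop()` loop
def pvDropExtra (stack : List Int) (r : Int) : List Int :=
  match stack with
  | [] => []
  | t :: rest => if r ≠ 0 then pvDropExtra rest (r - 1) else t :: rest

-- `while stack: result.append(stack.pop())`
def pvPopAll (stack : List Int) (res : List Int) : List Int :=
  match stack with
  | [] => res
  | t :: rest => pvPopAll rest (res ++ [t])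

def find_lexicographically_smaller_subsequence_of_size_k (arr : List Int) (k : Int) : List Int :=
  let n : Int := arr.length
  let st := arr.foldl pvStep ([], n - k)
  let stack := pvDropExtra st.1 st.2
  let result := pvPopAll stack []
  result.reverse

-- ===== PORT B =====
-- one sparse-table level: comprehension over range(n - 2*size + 1); all list reads are
-- in range by construction, so `getD _ 0` is exact for Python's `l[i]` here (indices are Nats)
def pvLevel (arr : List Int) (prev : List Nat) (size n : Nat) : List Nat :=
  (List.range (n - 2 * size + 1)).map (fun i =>
    if arr.getD (prev.getD i 0) 0 ≤ arr.getD (prev.getD (i + size) 0) 0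
    then prev.getD i 0 else prev.getD (i + size) 0)

-- the `while 2 * size <= n` loop building the remaining levels
def pvBuildLevels (arr : List Int) (n : Nat) (prev : List Nat) (size : Nat) : List (List Nat) :=
  if h : 2 * size ≤ n ∧ 1 ≤ size then
    let next := pvLevel arr prev size n
    next :: pvBuildLevels arr n next (2 * size)
  else []
termination_by n + 1 - size
decreasing_by omega

-- one iteration of the `for i in range(k)` loop, state (start, result);
-- `(hi - lo).bit_length() - 1` is PySem.Int.bitLength, `1 << j` is `1 <<< j`
def pvStepB (arr : List Int) (n kk : Nat) (table : List (List Nat))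
    (st : Nat × List Int) (i : Nat) : Nat × List Int :=
  let lo := st.1
  let hi := n - kk + i + 1
  let j := PySem.Int.bitLength ((hi : Int) - (lo : Int)) - 1
  let w := 1 <<< j
  let a := (table.getD j []).getD lo 0
  let b := (table.getD j []).getD (hi - w) 0
  let m := if arr.getD a 0 ≤ arr.getD b 0 then a else b
  (m + 1, st.2 ++ [arr.getD m 0])

def find_lexicographically_smaller_subsequence_of_size_k_alt (arr : List Int) (k : Int) : List Int :=
  let n := arr.length
  if k ≤ 0 ∨ (n : Int) < k then []
  else
    let table := List.range n :: pvBuildLevels arr n (List.range n) 1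
    ((List.range k.toNat).foldl (pvStepB arr n k.toNat table) (0, [])).2

-- ===== PRECONDITION & SPEC =====
def Spec_find_lexicographically_smaller_subsequence_of_size_k (arr : List Int) (k : Int) (out : List Int) : Prop := out = find_lexicographically_smaller_subsequence_of_size_k_alt arr k
instance (arr : List Int) (k : Int) (out : List Int) : Decidable (Spec_find_lexicographically_smaller_subsequence_of_size_k arr k out) := by unfold Spec_find_lexicographically_smaller_subsequence_of_size_k; infer_instance

-- ===== CLAIM (what is proved, stated in full; the proofs are below) =====
def Claim_equal_find_lexicographically_smaller_subsequence_of_size_k : Prop := ∀ (arr : List Int) (k : Int), Dom_find_lexicographically_smaller_subsequence_of_size_k arr k → Spec_find_lexicographically_smaller_subsequence_of_size_k arr k (find_lexicographically_smaller_subsequence_of_size_k arr k)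

-- ===== LEMMAS AND PROOFS =====

-- proof-side specification program: the recursive greedy (leftmost window minimum, then recurse
-- on the suffix); both ports are proved equal to it.  pvArgmin is its leftmost-minimum index fold.
def pvArgmin (arr : List Int) (n k : Int) : Int :=
  (PySem.List.pyRange 1 (n - k + 1) 1).foldl
    (fun m j => if PySem.List.pyGetD arr j 0 < PySem.List.pyGetD arr m 0 then j else m) 0

-- termination helper for pvGreedy (the argmin index is never negative)
theorem pvArgmin_nonneg (arr : List Int) (n k : Int) : 0 ≤ pvArgmin arr n k := by
  have key : ∀ (l : List Int) (m : Int), 0 ≤ m → (∀ j ∈ l, 0 ≤ j) →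
      0 ≤ l.foldl (fun m j =>
        if PySem.List.pyGetD arr j 0 < PySem.List.pyGetD arr m 0 then j else m) m := by
    intro l
    induction l with
    | nil => intro m hm _; simpa
    | cons j l ih =>
      intro m hm hall
      simp only [List.foldl_cons]
      by_cases hc : PySem.List.pyGetD arr j 0 < PySem.List.pyGetD arr m 0
      · rw [if_pos hc]
        exact ih _ (hall j (by simp)) (fun a ha => hall a (List.mem_cons_of_mem _ ha))
      · rw [if_neg hc]
        exact ih _ hm (fun a ha => hall a (List.mem_cons_of_mem _ ha))
  exact key _ 0 le_rfl
    (fun j hj => le_trans (by omega) (PySem.List.mem_pyRange_one.mp hj).1)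

def pvGreedy (arr : List Int) (k : Int) : List Int :=
  let n : Int := arr.length
  if k ≤ 0 ∨ n < k then []
  else
    let m := pvArgmin arr n k
    PySem.List.pyGetD arr m 0 ::
      pvGreedy
        (PySem.List.slice arr (some (m + 1)) none) (k - 1)
termination_by arr.length
decreasing_by
  rename_i h
  have hm := pvArgmin_nonneg arr arr.length k
  rw [PySem.List.slice_from arr (show (0:Int) ≤ pvArgmin arr arr.length k + 1 by omega)]
  have h1 : 1 ≤ (pvArgmin arr arr.length k + 1).toNat := by omega
  have h2 : 1 ≤ arr.length := by omega
  simp only [List.length_drop]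
  omega


-- pvPopAll just reverses the stack onto res (so the port's result is the stack itself)
theorem pvPopAll_eq (stack res : List Int) : pvPopAll stack res = res ++ stack := by
  induction stack generalizing res with
  | nil => simp [pvPopAll]
  | cons t rest ih => simp [pvPopAll, ih]

-- budget/length bookkeeping of the inner pop loop
theorem pvPopWhile_delta (s : List Int) (b e : Int) :
    (pvPopWhile s b e).2 - ((pvPopWhile s b e).1.length : Int) = b - s.length := by
  induction s generalizing b with
  | nil => simp [pvPopWhile]
  | cons t rest ih =>
    simp only [pvPopWhile]
    split
    · have h2 := ih (b - 1)
      simp only [List.length_cons] at h2 ⊢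
      push_cast at h2 ⊢
      omega
    · simp

theorem pvPopWhile_nonneg (s : List Int) (b e : Int) (hb : 0 ≤ b) :
    0 ≤ (pvPopWhile s b e).2 := by
  induction s generalizing b with
  | nil => simpa [pvPopWhile]
  | cons t rest ih =>
    simp only [pvPopWhile]
    split
    · rename_i h; exact ih (b - 1) (by omega)
    · simpa

theorem pvPopWhile_le (s : List Int) (b e : Int) : (pvPopWhile s b e).2 ≤ b := by
  induction s generalizing b with
  | nil => simp [pvPopWhile]
  | cons t rest ih =>
    simp only [pvPopWhile]
    split
    · have := ih (b - 1) ; omega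
    · simp

theorem pvPopWhile_subset (s : List Int) (b e : Int) :
    ∀ a ∈ (pvPopWhile s b e).1, a ∈ s := by
  induction s generalizing b with
  | nil => simp [pvPopWhile]
  | cons t rest ih =>
    simp only [pvPopWhile]
    split
    · intro a ha; exact List.mem_cons_of_mem _ (ih (b - 1) a ha)
    · intro a ha; simpa using ha

-- if every stacked element is larger and the budget suffices, everything is popped
theorem pvPopWhile_all (s : List Int) (b e : Int) (hb : (s.length : Int) ≤ b)
    (hlt : ∀ a ∈ s, e < a) : pvPopWhile s b e = ([], b - s.length) := by
  induction s generalizing b with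
  | nil => simp [pvPopWhile]
  | cons t rest ih =>
    have ht : e < t := hlt t (by simp)
    have hb' : b ≠ 0 := by simp only [List.length_cons] at hb; push_cast at hb; omega
    have hc : t > e ∧ b ≠ 0 := ⟨ht, hb'⟩
    simp only [pvPopWhile, if_pos hc]
    rw [ih (b - 1) (by simp only [List.length_cons] at hb ⊢; push_cast at hb ⊢; omega)
      (fun a ha => hlt a (List.mem_cons_of_mem _ ha))]
    simp only [List.length_cons, Prod.mk.injEq, true_and]
    push_cast; ring

-- a bottom element that the budget can never reach is inert
theorem pvPopWhile_append (s : List Int) (b e bot : Int) (hb : 0 ≤ b)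
    (h : e < bot → b - (s.length : Int) ≤ 0) :
    pvPopWhile (s ++ [bot]) b e = ((pvPopWhile s b e).1 ++ [bot], (pvPopWhile s b e).2) := by
  induction s generalizing b with
  | nil =>
    simp only [List.nil_append, pvPopWhile]
    split
    · rename_i hc; exfalso; have := h hc.1; simp only [List.length_nil] at this
      exact hc.2 (by omega)
    · rfl
  | cons t rest ih =>
    simp only [List.cons_append, pvPopWhile]
    split
    · rename_i hc
      exact ih (b - 1) (by omega)
        (fun he => by have := h he; simp only [List.length_cons] at *; push_cast at *; omega)
    · rfl

-- fold bookkeeping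
theorem pvFold_delta (ys : List Int) : ∀ (s : List Int) (b : Int),
    (ys.foldl pvStep (s, b)).2 - ((ys.foldl pvStep (s, b)).1.length : Int)
      = b - s.length - ys.length := by
  induction ys with
  | nil => intro s b; simp
  | cons e ys ih =>
    intro s b
    simp only [List.foldl_cons]
    by_cases hs : s = []
    · subst hs
      simp only [pvStep]
      have h2 := ih [e] b
      simp only [List.length_cons, List.length_nil] at h2 ⊢
      push_cast at h2 ⊢
      omega
    · simp only [pvStep, if_neg hs]
      have h1 := pvPopWhile_delta s b e
      have h2 := ih (e :: (pvPopWhile s b e).1) (pvPopWhile s b e).2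
      simp only [List.length_cons] at h1 h2 ⊢
      push_cast at h1 h2 ⊢
      omega

theorem pvFold_nonneg (ys : List Int) : ∀ (s : List Int) (b : Int), 0 ≤ b →
    0 ≤ (ys.foldl pvStep (s, b)).2 := by
  induction ys with
  | nil => intro s b hb; simpa
  | cons e ys ih =>
    intro s b hb
    simp only [List.foldl_cons]
    by_cases hs : s = []
    · subst hs; simp only [pvStep]; exact ih _ _ hb
    · simp only [pvStep, if_neg hs]; exact ih _ _ (pvPopWhile_nonneg s b e hb)

theorem pvFold_le (ys : List Int) : ∀ (s : List Int) (b : Int),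
    (ys.foldl pvStep (s, b)).2 ≤ b := by
  induction ys with
  | nil => intro s b; simp
  | cons e ys ih =>
    intro s b
    simp only [List.foldl_cons]
    by_cases hs : s = []
    · simp only [pvStep, if_pos hs]; exact ih _ _
    · simp only [pvStep, if_neg hs]
      exact le_trans (ih _ _) (pvPopWhile_le s b e)

theorem pvFold_subset (ys : List Int) : ∀ (s : List Int) (b : Int),
    ∀ a ∈ (ys.foldl pvStep (s, b)).1, a ∈ s ∨ a ∈ ys := by
  induction ys with
  | nil => intro s b a ha; exact Or.inl ha
  | cons e ys ih =>
    intro s b a ha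
    simp only [List.foldl_cons] at ha
    by_cases hs : s = []
    · subst hs
      simp only [pvStep] at ha
      rcases ih [e] b a ha with h | h
      · simp at h; exact Or.inr (by simp [h])
      · exact Or.inr (List.mem_cons_of_mem _ h)
    · simp only [pvStep, if_neg hs] at ha
      rcases ih _ _ a ha with h | h
      · rcases List.mem_cons.mp h with h | h
        · exact Or.inr (by simp [h])
        · exact Or.inl (pvPopWhile_subset s b e a h)
      · exact Or.inr (List.mem_cons_of_mem _ h)

-- phase 1: a prefix of strictly larger elements is fully consumed by x
theorem pvFold_phase1 (pre : List Int) (x : Int) (b : Int)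
    (hlt : ∀ a ∈ pre, x < a) (hb : (pre.length : Int) ≤ b) :
    (pre ++ [x]).foldl pvStep ([], b) = ([x], b - pre.length) := by
  rw [List.foldl_append]
  have hsub := pvFold_subset pre [] b
  rcases hsplit : pre.foldl pvStep ([], b) with ⟨S, b2⟩
  rw [hsplit] at hsub
  have hdelta : b2 - (S.length : Int) = b - pre.length := by
    have h := pvFold_delta pre [] b
    rw [hsplit] at h
    simpa using h
  simp only [List.foldl_cons, List.foldl_nil]
  by_cases hS : S = []
  · subst hS
    simp only [List.length_nil, Nat.cast_zero, sub_zero] at hdelta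
    simp [pvStep]
    omega
  · simp only [pvStep, if_neg hS]
    have hall : ∀ a ∈ S, x < a := by
      intro a ha
      rcases hsub a ha with h | h
      · simp at h
      · exact hlt a h
    rw [pvPopWhile_all S b2 x (by omega) hall]
    simp only [Prod.mk.injEq]
    refine ⟨by simp, by omega⟩

-- phase 2: a bottom element that minimality + budget protect is inert for the whole fold
theorem pvFold_bottom (ys : List Int) : ∀ (s : List Int) (b bot : Int), 0 ≤ b →
    (∀ p : Nat, (hp : p < ys.length) → ys[p] < bot → b - (s.length : Int) ≤ p) →
    ys.foldl pvStep (s ++ [bot], b)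
      = ((ys.foldl pvStep (s, b)).1 ++ [bot], (ys.foldl pvStep (s, b)).2) := by
  induction ys with
  | nil => intro s b bot _ _; simp
  | cons e ys ih =>
    intro s b bot hb hsafe
    simp only [List.foldl_cons]
    have hb0 : e < bot → b - (s.length : Int) ≤ 0 := fun he =>
      hsafe 0 (by simp) (by simpa using he) |>.trans (by simp)
    have hpw := pvPopWhile_append s b e bot hb hb0
    by_cases hs : s = []
    · subst hs
      have hcomb : pvStep ([] ++ [bot], b) e = ([e] ++ [bot], b) := by
        simp only [pvStep, List.nil_append, if_neg (by simp : ¬([bot] : List Int) = [])]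
        simp only [List.nil_append] at hpw
        rw [hpw]
        simp [pvPopWhile]
      have hfresh : pvStep (([] : List Int), b) e = ([e], b) := by simp [pvStep]
      rw [hcomb, hfresh]
      exact ih [e] b bot hb (fun p hp hlt => by
        have := hsafe (p + 1) (by simpa using hp) (by simpa using hlt)
        simp only [List.length_nil, List.length_cons, Nat.cast_zero, Nat.cast_add] at this ⊢
        push_cast at this ⊢
        omega)
    · have hcomb : pvStep (s ++ [bot], b) e
          = ((e :: (pvPopWhile s b e).1) ++ [bot], (pvPopWhile s b e).2) := by
        simp only [pvStep, if_neg (by simp [hs] : ¬(s ++ [bot]) = [])]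
        rw [hpw]
        simp
      have hfresh : pvStep (s, b) e = (e :: (pvPopWhile s b e).1, (pvPopWhile s b e).2) := by
        simp only [pvStep, if_neg hs]
      rw [hcomb, hfresh]
      have hd := pvPopWhile_delta s b e
      exact ih _ _ bot (pvPopWhile_nonneg s b e hb) (fun p hp hlt => by
        have := hsafe (p + 1) (by simpa using hp) (by simpa using hlt)
        simp only [List.length_cons] at this ⊢
        push_cast at this hd ⊢
        omega)

theorem pvDropExtra_append (S T : List Int) (b : Int) (h0 : 0 ≤ b) (h1 : b ≤ (S.length : Int)) :
    pvDropExtra (S ++ T) b = pvDropExtra S b ++ T := by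
  induction S generalizing b with
  | nil =>
    have : b = 0 := by simp at h1; omega
    subst this
    cases T <;> simp [pvDropExtra]
  | cons t S ih =>
    by_cases hb : b = 0
    · subst hb; simp [pvDropExtra]
    · simp only [List.cons_append, pvDropExtra, if_pos hb]
      exact ih (b - 1) (by omega) (by simp at h1 ⊢; omega)

theorem pvDropExtra_all (S : List Int) (b : Int) (h : b < 0 ∨ (S.length : Int) ≤ b) :
    pvDropExtra S b = [] := by
  induction S generalizing b with
  | nil => simp [pvDropExtra]
  | cons t S ih =>
    have hb : b ≠ 0 := by simp at h; omega
    simp only [pvDropExtra, if_pos hb]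
    exact ih (b - 1) (by simp at h ⊢; omega)

-- characterisation of the argmin fold
theorem pvArgmin_spec (arr : List Int) (t : Nat) (h1 : 1 ≤ t) (h2 : t ≤ arr.length) :
    ∃ M : Nat,
      (PySem.List.pyRange 1 (t : Int) 1).foldl
        (fun m j => if PySem.List.pyGetD arr j 0 < PySem.List.pyGetD arr m 0 then j else m) 0
        = (M : Int)
      ∧ M < t
      ∧ (∀ j : Nat, j < M → arr.getD M 0 < arr.getD j 0)
      ∧ (∀ j : Nat, j < t → arr.getD M 0 ≤ arr.getD j 0) := by
  induction t, h1 using Nat.le_induction with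
  | base =>
    refine ⟨0, ?_, by omega, by omega, ?_⟩
    · rw [PySem.List.pyRange_one_eq_nil (by norm_num)]
      simp
    · intro j hj
      interval_cases j
      exact le_rfl
  | succ t ht ih =>
    obtain ⟨M, hM, hMt, hii, hiii⟩ := ih (by omega)
    have hr : PySem.List.pyRange 1 ((t + 1 : Nat) : Int) 1
        = PySem.List.pyRange 1 (t : Int) 1 ++ [(t : Int)] := by
      push_cast
      exact PySem.List.pyRange_one_succ_right (by omega)
    rw [hr, List.foldl_append, hM]
    simp only [List.foldl_cons, List.foldl_nil, PySem.List.pyGetD_natCast]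
    by_cases hc : arr.getD t 0 < arr.getD M 0
    · refine ⟨t, by rw [if_pos hc], by omega, ?_, ?_⟩
      · intro j hj
        rcases lt_trichotomy j M with h | h | h
        · exact hc.trans (hii j h)
        · subst h; exact hc
        · exact lt_of_lt_of_le hc (hiii j hj)
      · intro j hj
        rcases Nat.lt_succ_iff_lt_or_eq.mp hj with h | h
        · exact le_of_lt (lt_of_lt_of_le hc (hiii j h))
        · subst h; exact le_rfl
    · refine ⟨M, by rw [if_neg hc], by omega, hii, ?_⟩
      intro j hj
      rcases Nat.lt_succ_iff_lt_or_eq.mp hj with h | h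
      · exact hiii j h
      · subst h; omega

-- the main recursion/base analysis for port A, by induction on a length bound
theorem pvMain (N : Nat) : ∀ (arr : List Int) (k : Int), arr.length ≤ N →
    find_lexicographically_smaller_subsequence_of_size_k arr k = pvGreedy arr k := by
  induction N with
  | zero =>
    intro arr k hlen
    have harr : arr = [] := List.eq_nil_of_length_eq_zero (by omega)
    subst harr
    rw [pvGreedy,
      if_pos (by simp; omega)]
    simp [find_lexicographically_smaller_subsequence_of_size_k, pvDropExtra, pvPopAll]
  | succ N ih =>
    intro arr k hlen
    by_cases hedge : k ≤ 0 ∨ (arr.length : Int) < k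
    · rw [pvGreedy, if_pos hedge]
      simp only [find_lexicographically_smaller_subsequence_of_size_k]
      rcases hsplit : arr.foldl pvStep ([], (arr.length : Int) - k) with ⟨S, b2⟩
      have hdelta : b2 - (S.length : Int) = -k := by
        have h := pvFold_delta arr [] ((arr.length : Int) - k)
        rw [hsplit] at h
        simp at h
        omega
      have hle : b2 ≤ (arr.length : Int) - k := by
        have h := pvFold_le arr [] ((arr.length : Int) - k)
        rw [hsplit] at h
        simpa using h
      have hnil : pvDropExtra S b2 = [] := by
        rcases hedge with h | h
        · exact pvDropExtra_all S b2 (Or.inr (by omega))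
        · exact pvDropExtra_all S b2 (Or.inl (by omega))
      simp [hnil, pvPopAll]
    · have hk0 : 0 < k := by omega
      have hkn : k ≤ (arr.length : Int) := by omega
      have hlenpos : 1 ≤ arr.length := by omega
      obtain ⟨t, ht⟩ : ∃ t : Nat, (t : Int) = (arr.length : Int) - k + 1 :=
        ⟨((arr.length : Int) - k + 1).toNat, by omega⟩
      have ht1 : 1 ≤ t := by omega
      have ht2 : t ≤ arr.length := by omega
      obtain ⟨M, hM, hMt, hii, hiii⟩ := pvArgmin_spec arr t ht1 ht2
      have hMn : M < arr.length := by omega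
      have hargmin : pvArgmin arr (arr.length : Int) k = (M : Int) := by
        unfold pvArgmin
        rw [show (arr.length : Int) - k + 1 = (t : Int) from by omega]
        exact hM
      have hx : arr.getD M 0 = arr[M] := List.getD_eq_getElem arr 0 hMn
      have htake : (arr.take M).length = M := by
        rw [List.length_take]
        omega
      have hsplitarr : arr = (arr.take M ++ [arr[M]]) ++ arr.drop (M + 1) := by
        conv_lhs => rw [← List.take_append_drop M arr, List.drop_eq_getElem_cons hMn]
        simp
      set ys := arr.drop (M + 1) with hys
      have hyslen : (ys.length : Int) = (arr.length : Int) - M - 1 := by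
        rw [hys, List.length_drop]
        omega
      have hphase1 : (arr.take M ++ [arr[M]]).foldl pvStep ([], (arr.length : Int) - k)
          = ([arr[M]], (arr.length : Int) - k - M) := by
        rw [pvFold_phase1 (arr.take M) arr[M] ((arr.length : Int) - k) ?_ ?_]
        · rw [htake]
        · intro a ha
          obtain ⟨i, hi, hia⟩ := List.mem_iff_getElem.mp ha
          rw [htake] at hi
          subst hia
          rw [List.getElem_take]
          have h := hii i hi
          rw [hx, List.getD_eq_getElem arr 0 (by omega : i < arr.length)] at h
          exact h
        · rw [htake]
          omega
      have hsafe : ∀ p : Nat, (hp : p < ys.length) → ys[p] < arr[M] →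
          (arr.length : Int) - k - M - (([] : List Int).length : Int) ≤ p := by
        intro p hp hlt
        simp only [List.length_nil, Nat.cast_zero, sub_zero]
        by_contra hcon
        have hidx : M + 1 + p < t := by omega
        have h := hiii (M + 1 + p) hidx
        rw [hx, List.getD_eq_getElem arr 0 (by omega : M + 1 + p < arr.length)] at h
        have hyp : ys[p] = arr[M + 1 + p] := List.getElem_drop
        rw [hyp] at hlt
        omega
      have hfold : arr.foldl pvStep ([], (arr.length : Int) - k)
          = ((ys.foldl pvStep ([], (arr.length : Int) - k - M)).1 ++ [arr[M]],
             (ys.foldl pvStep ([], (arr.length : Int) - k - M)).2) := by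
        rw [show arr.foldl pvStep (([] : List Int), (arr.length : Int) - k)
              = (List.take M arr ++ [arr[M]] ++ ys).foldl pvStep ([], (arr.length : Int) - k)
            from by rw [← hsplitarr]]
        rw [List.foldl_append, hphase1]
        have h := pvFold_bottom ys [] ((arr.length : Int) - k - M) arr[M] (by omega) hsafe
        simpa using h
      rcases hG : ys.foldl pvStep ([], (arr.length : Int) - k - M) with ⟨S', b'⟩
      rw [hG] at hfold
      have hb'0 : 0 ≤ b' := by
        have h := pvFold_nonneg ys [] ((arr.length : Int) - k - M) (by omega)
        rw [hG] at h
        simpa using h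
      have hb'len : b' ≤ (S'.length : Int) := by
        have h := pvFold_delta ys [] ((arr.length : Int) - k - M)
        rw [hG] at h
        simp at h
        omega
      -- A side
      simp only [find_lexicographically_smaller_subsequence_of_size_k]
      rw [hfold]
      have hsimp : ((S', b').1 ++ [arr[M]], (S', b').2) = (S' ++ [arr[M]], b') := rfl
      rw [hsimp]
      rw [show pvDropExtra (S' ++ [arr[M]]) b' = pvDropExtra S' b' ++ [arr[M]] from
        pvDropExtra_append S' [arr[M]] b' hb'0 hb'len]
      rw [pvPopAll_eq, List.nil_append, List.reverse_append]
      -- B side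
      have halt : pvGreedy arr k
          = PySem.List.pyGetD arr ((M : Int)) 0 ::
            pvGreedy
              (PySem.List.slice arr (some ((M : Int) + 1))) (k - 1) := by
        rw [pvGreedy]
        simp only [hargmin]
        rw [if_neg (by omega : ¬(k ≤ 0 ∨ (arr.length : Int) < k))]
      rw [halt]
      rw [PySem.List.pyGetD_natCast arr M 0, hx]
      rw [PySem.List.slice_from arr (by omega : (0:Int) ≤ (M : Int) + 1)]
      rw [show ((M : Int) + 1).toNat = M + 1 from by omega]
      rw [← hys]
      -- recursion
      have hA : find_lexicographically_smaller_subsequence_of_size_k ys (k - 1)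
          = (pvDropExtra S' b').reverse := by
        simp only [find_lexicographically_smaller_subsequence_of_size_k]
        rw [show (ys.length : Int) - (k - 1) = (arr.length : Int) - k - M from by omega, hG]
        rw [pvPopAll_eq, List.nil_append]
      have hrec := ih ys (k - 1) (by rw [hys]; simp [List.length_drop]; omega)
      rw [← hrec, hA]
      simp

-- "m is the leftmost minimum of indices [lo, hi)" (in the total getD reading both programs use)
def pvLAM (arr : List Int) (lo hi m : Nat) : Prop :=
  lo ≤ m ∧ m < hi ∧ (∀ j, lo ≤ j → j < m → arr.getD m 0 < arr.getD j 0)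
    ∧ (∀ j, lo ≤ j → j < hi → arr.getD m 0 ≤ arr.getD j 0)

theorem pvLAM_unique (arr : List Int) (lo hi m1 m2 : Nat)
    (h1 : pvLAM arr lo hi m1) (h2 : pvLAM arr lo hi m2) : m1 = m2 := by
  by_contra hne
  rcases Nat.lt_or_ge m1 m2 with h | h
  · have ha := h2.2.2.1 m1 h1.1 h
    have hb := h1.2.2.2 m2 h2.1 h2.2.1
    omega
  · have h' : m2 < m1 := by omega
    have ha := h1.2.2.1 m2 h2.1 h'
    have hb := h2.2.2.2 m1 h1.1 h1.2.1
    omega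

-- combining two overlapping blocks that cover [lo, hi), preferring the left one on ties
theorem pvLAM_union (arr : List Int) (lo hi w a b : Nat)
    (h1 : lo + w ≤ hi) (h2 : hi ≤ lo + 2 * w)
    (ha : pvLAM arr lo (lo + w) a) (hb : pvLAM arr (hi - w) hi b) :
    pvLAM arr lo hi (if arr.getD a 0 ≤ arr.getD b 0 then a else b) := by
  by_cases hab : arr.getD a 0 ≤ arr.getD b 0
  · rw [if_pos hab]
    refine ⟨ha.1, by have := ha.2.1; omega, ?_, ?_⟩
    · intro j hj1 hj2
      exact ha.2.2.1 j hj1 hj2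
    · intro j hj1 hj2
      by_cases hjw : j < lo + w
      · exact ha.2.2.2 j hj1 hjw
      · exact le_trans hab (hb.2.2.2 j (by omega) hj2)
  · rw [if_neg hab]
    have hba : arr.getD b 0 < arr.getD a 0 := by omega
    refine ⟨by have := hb.1; omega, hb.2.1, ?_, ?_⟩
    · intro j hj1 hj2
      by_cases hjw : hi - w ≤ j
      · exact hb.2.2.1 j hjw hj2
      · exact lt_of_lt_of_le hba (ha.2.2.2 j hj1 (by omega))
    · intro j hj1 hj2
      by_cases hjw : j < lo + w
      · exact le_trans (le_of_lt hba) (ha.2.2.2 j hj1 hjw)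
      · exact hb.2.2.2 j (by omega) hj2

-- invariant of one sparse-table level
def pvLevelOK (arr : List Int) (n size : Nat) (L : List Nat) : Prop :=
  L.length = n + 1 - size ∧ ∀ i, i < L.length → pvLAM arr i (i + size) (L.getD i 0)

theorem pvLevelOK_range (arr : List Int) (n : Nat) :
    pvLevelOK arr n 1 (List.range n) := by
  refine ⟨by simp, ?_⟩
  intro i hi
  have hget : (List.range n).getD i 0 = i := by
    rw [List.getD_eq_getElem _ _ (by simpa using hi), List.getElem_range]
  rw [hget]
  refine ⟨le_rfl, by omega, fun j h1 h2 => by omega, fun j h1 h2 => ?_⟩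
  have hji : j = i := by omega
  subst hji
  exact le_rfl

theorem pvLevel_ok (arr : List Int) (n size : Nat) (L : List Nat)
    (h : pvLevelOK arr n size L) (hsz : 1 ≤ size) (hle : 2 * size ≤ n) :
    pvLevelOK arr n (2 * size) (pvLevel arr L size n) := by
  have hlen : (pvLevel arr L size n).length = n - 2 * size + 1 := by
    simp [pvLevel]
  refine ⟨by omega, ?_⟩
  intro i hi
  rw [hlen] at hi
  have hgd : (pvLevel arr L size n).getD i 0
      = (if arr.getD (L.getD i 0) 0 ≤ arr.getD (L.getD (i + size) 0) 0
         then L.getD i 0 else L.getD (i + size) 0) := by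
    rw [List.getD_eq_getElem _ _ (by rw [hlen]; exact hi)]
    simp [pvLevel]
  rw [hgd]
  have hL := h.1
  have ha := h.2 i (by omega)
  have hb := h.2 (i + size) (by omega)
  have hb' : pvLAM arr (i + 2 * size - size) (i + 2 * size) (L.getD (i + size) 0) := by
    rw [show i + 2 * size - size = i + size from by omega]
    rw [show i + 2 * size = (i + size) + size from by omega]
    exact hb
  exact pvLAM_union arr i (i + 2 * size) size (L.getD i 0) (L.getD (i + size) 0)
    (by omega) (by omega) ha hb' 

theorem pvBuild_ok (arr : List Int) (n : Nat) : ∀ (j s : Nat) (prev : List Nat),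
    pvLevelOK arr n s prev → 1 ≤ s → 2 ^ (j + 1) * s ≤ n →
    pvLevelOK arr n (2 ^ (j + 1) * s) ((pvBuildLevels arr n prev s).getD j []) := by
  intro j
  induction j with
  | zero =>
    intro s prev h hs hle
    have hle' : 2 * s ≤ n := by
      have : 2 ^ (0 + 1) * s = 2 * s := by norm_num
      omega
    rw [pvBuildLevels, dif_pos ⟨hle', hs⟩]
    simp only [List.getD_cons_zero]
    have := pvLevel_ok arr n s prev h hs hle'
    simpa [pow_succ] using this
  | succ j ih =>
    intro s prev h hs hle
    have hpow : (2:Nat) ≤ 2 ^ (j + 1 + 1) := by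
      calc (2:Nat) = 2 ^ 1 := by norm_num
        _ ≤ 2 ^ (j + 1 + 1) := Nat.pow_le_pow_right (by norm_num) (by omega)
    have hle2 : 2 * s ≤ n := by
      have : 2 * s ≤ 2 ^ (j + 1 + 1) * s := Nat.mul_le_mul_right s hpow
      omega
    rw [pvBuildLevels, dif_pos ⟨hle2, hs⟩]
    simp only [List.getD_cons_succ]
    have hnext := pvLevel_ok arr n s prev h hs hle2
    have hres := ih (2 * s) (pvLevel arr prev s n) hnext (by omega)
      (by rw [show 2 ^ (j + 1) * (2 * s) = 2 ^ (j + 1 + 1) * s from by ring]; exact hle)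
    rw [show (2:Nat) ^ (j + 1 + 1) * s = 2 ^ (j + 1) * (2 * s) from by ring]
    exact hres

theorem pvTable_ok (arr : List Int) (n : Nat) : ∀ j : Nat, 2 ^ j ≤ n →
    pvLevelOK arr n (2 ^ j) ((List.range n :: pvBuildLevels arr n (List.range n) 1).getD j []) := by
  intro j hj
  cases j with
  | zero =>
    simp only [List.getD_cons_zero, pow_zero]
    exact pvLevelOK_range arr n
  | succ j =>
    simp only [List.getD_cons_succ]
    have := pvBuild_ok arr n j 1 (List.range n) (pvLevelOK_range arr n) le_rfl
      (by simpa using hj)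
    simpa using this

-- the query of port B, as one named function of (lo, hi)
def pvQueryFn (arr : List Int) (n lo hi : Nat) : Nat :=
  let table := List.range n :: pvBuildLevels arr n (List.range n) 1
  let j := PySem.Int.bitLength ((hi : Int) - (lo : Int)) - 1
  let w := 1 <<< j
  let a := (table.getD j []).getD lo 0
  let b := (table.getD j []).getD (hi - w) 0
  if arr.getD a 0 ≤ arr.getD b 0 then a else b

-- the query returns the leftmost minimum of [lo, hi)
theorem pvQuery_lam (arr : List Int) (n lo hi : Nat) (hlo : lo < hi) (hhi : hi ≤ n) :
    pvLAM arr lo hi (pvQueryFn arr n lo hi) := by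
  unfold pvQueryFn
  have hcast : ((hi : Int) - (lo : Int)) = ((hi - lo : Nat) : Int) := by omega
  have hub : hi - lo < 2 ^ PySem.Int.bitLength ((hi - lo : Nat) : Int) := by
    have h := PySem.Int.lt_two_pow_bitLength ((hi - lo : Nat) : Int)
    simpa using h
  have hlb : 2 ^ (PySem.Int.bitLength ((hi - lo : Nat) : Int) - 1) ≤ hi - lo := by
    have h := PySem.Int.two_pow_bitLength_le ((hi - lo : Nat) : Int) (by omega)
    simpa using h
  have hblpos : 1 ≤ PySem.Int.bitLength ((hi - lo : Nat) : Int) := by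
    by_contra hc
    have h0 : PySem.Int.bitLength ((hi - lo : Nat) : Int) = 0 := by omega
    rw [h0, pow_zero] at hub
    omega
  simp only [hcast, Nat.one_shiftLeft]
  set J := PySem.Int.bitLength ((hi - lo : Nat) : Int) - 1 with hJ
  have hw1 : 2 ^ J ≤ hi - lo := hlb
  have hw2 : hi - lo < 2 * 2 ^ J := by
    have h1 : 2 * 2 ^ J = 2 ^ (J + 1) := by rw [pow_succ]; ring
    rw [h1, show J + 1 = PySem.Int.bitLength ((hi - lo : Nat) : Int) from by omega]
    exact hub
  have hJn : 2 ^ J ≤ n := le_trans hw1 (by omega)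
  obtain ⟨hlen, hTL⟩ := pvTable_ok arr n J hJn
  have ha := hTL lo (by omega)
  have hb := hTL (hi - 2 ^ J) (by omega)
  have hb' : pvLAM arr (hi - 2 ^ J) hi
      (((List.range n :: pvBuildLevels arr n (List.range n) 1).getD J []).getD (hi - 2 ^ J) 0) := by
    convert hb using 2
    omega
  exact pvLAM_union arr lo hi (2 ^ J) _ _ (by omega) (by omega) ha hb' 

theorem pvGetD_drop (arr : List Int) (s j : Nat) :
    (arr.drop s).getD j 0 = arr.getD (s + j) 0 := by
  by_cases h : j < (arr.drop s).length
  · rw [List.getD_eq_getElem _ _ h, List.getElem_drop,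
      List.getD_eq_getElem _ _ (by simp only [List.length_drop] at h; omega)]
  · have h1 : (arr.drop s).length ≤ j := by omega
    rw [List.getD_eq_default _ _ h1,
      List.getD_eq_default _ _ (by simp only [List.length_drop] at h1; omega)]

theorem pvLAM_drop (arr : List Int) (s t m : Nat) (hm : s ≤ m)
    (h : pvLAM arr s (s + t) m) : pvLAM (arr.drop s) 0 t (m - s) := by
  have hm' : s + (m - s) = m := by omega
  refine ⟨Nat.zero_le _, by have := h.2.1; omega, ?_, ?_⟩
  · intro j _ hj
    rw [pvGetD_drop, pvGetD_drop, hm']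
    exact h.2.2.1 (s + j) (by omega) (by omega)
  · intro j _ hj
    rw [pvGetD_drop, pvGetD_drop, hm']
    exact h.2.2.2 (s + j) (by omega) (by omega)

-- one unfolding of pvGreedy in the main case, with its pick characterised as a pvLAM
theorem pvGreedy_unfold (arr : List Int) (k : Int) (h0 : 0 < k) (h1 : k ≤ (arr.length : Int)) :
    ∃ M : Nat, pvLAM arr 0 (arr.length - (k.toNat - 1)) M ∧
      pvGreedy arr k = arr.getD M 0 :: pvGreedy (arr.drop (M + 1)) (k - 1) := by
  obtain ⟨t, ht⟩ : ∃ t : Nat, (t : Int) = (arr.length : Int) - k + 1 :=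
    ⟨((arr.length : Int) - k + 1).toNat, by omega⟩
  have ht1 : 1 ≤ t := by omega
  have ht2 : t ≤ arr.length := by omega
  obtain ⟨M, hM, hMt, hii, hiii⟩ := pvArgmin_spec arr t ht1 ht2
  have hargmin : pvArgmin arr (arr.length : Int) k = (M : Int) := by
    unfold pvArgmin
    rw [show (arr.length : Int) - k + 1 = (t : Int) from by omega]
    exact hM
  refine ⟨M, ?_, ?_⟩
  · have hteq : arr.length - (k.toNat - 1) = t := by omega
    rw [hteq]
    exact ⟨Nat.zero_le _, hMt, fun j _ hj => hii j hj, fun j _ hj => hiii j hj⟩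
  · have halt : pvGreedy arr k
        = PySem.List.pyGetD arr ((M : Int)) 0 ::
          pvGreedy (PySem.List.slice arr (some ((M : Int) + 1))) (k - 1) := by
      rw [pvGreedy]
      simp only [hargmin]
      rw [if_neg (by omega : ¬(k ≤ 0 ∨ (arr.length : Int) < k))]
    rw [halt, PySem.List.pyGetD_natCast arr M 0,
      PySem.List.slice_from arr (by omega : (0:Int) ≤ (M : Int) + 1),
      show ((M : Int) + 1).toNat = M + 1 from by omega]

-- the outer loop of port B computes the greedy recursion on the remaining suffix
theorem pvLoop (arr : List Int) (kk : Nat) (hk : kk ≤ arr.length) :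
    ∀ (m i start : Nat) (res : List Int), i + m = kk → start + (kk - i) ≤ arr.length →
      ((List.range' i m).foldl
          (pvStepB arr arr.length kk
            (List.range arr.length :: pvBuildLevels arr arr.length (List.range arr.length) 1))
          (start, res)).2
        = res ++ pvGreedy (arr.drop start) (m : Int) := by
  intro m
  induction m with
  | zero =>
    intro i start res h1 h2
    rw [List.range'_zero, List.foldl_nil]
    rw [pvGreedy, if_pos (Or.inl (by simp))]
    simp
  | succ m ih =>
    intro i start res h1 h2
    have hhi : arr.length - kk + i + 1 = arr.length - m := by omega
    rw [List.range'_succ, List.foldl_cons]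
    have hstep : pvStepB arr arr.length kk
        (List.range arr.length :: pvBuildLevels arr arr.length (List.range arr.length) 1)
        (start, res) i
        = (pvQueryFn arr arr.length start (arr.length - m) + 1,
           res ++ [arr.getD (pvQueryFn arr arr.length start (arr.length - m)) 0]) := by
      simp only [pvStepB, pvQueryFn]
      rw [hhi]
    rw [hstep]
    have hlam := pvQuery_lam arr arr.length start (arr.length - m) (by omega) (by omega)
    set q := pvQueryFn arr arr.length start (arr.length - m) with hq
    have hq1 : start ≤ q := hlam.1
    have hq2 : q < arr.length - m := hlam.2.1
    obtain ⟨M, hLAM, hgreedy⟩ := pvGreedy_unfold (arr.drop start) ((m + 1 : Nat) : Int)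
      (by omega) (by simp only [List.length_drop]; omega)
    have hwin : (arr.drop start).length - (((m + 1 : Nat) : Int).toNat - 1)
        = (arr.length - m) - start := by
      simp only [List.length_drop]
      omega
    have hLAM' : pvLAM (arr.drop start) 0 ((arr.length - m) - start) M := by
      rw [← hwin]
      exact hLAM
    have hdropLAM : pvLAM (arr.drop start) 0 ((arr.length - m) - start) (q - start) := by
      refine pvLAM_drop arr start _ q hq1 ?_
      rw [show start + ((arr.length - m) - start) = arr.length - m from by omega]
      exact hlam
    have hMq : M = q - start := pvLAM_unique _ _ _ _ _ hLAM' hdropLAM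
    rw [ih (i + 1) (q + 1) (res ++ [arr.getD q 0]) (by omega) (by omega)]
    rw [hgreedy]
    have hval : arr.getD q 0 = (arr.drop start).getD M 0 := by
      rw [pvGetD_drop, show start + M = q from by omega]
    have hdd : (arr.drop start).drop (M + 1) = arr.drop (q + 1) := by
      rw [List.drop_drop]
      congr 1
      omega
    have hk1 : ((m + 1 : Nat) : Int) - 1 = (m : Int) := by push_cast; ring
    rw [hdd, hk1, ← hval]
    simp

-- port B equals the greedy specification program
theorem pvAltEq (arr : List Int) (k : Int) :
    find_lexicographically_smaller_subsequence_of_size_k_alt arr k = pvGreedy arr k := by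
  by_cases hedge : k ≤ 0 ∨ ((arr.length : Nat) : Int) < k
  · rw [find_lexicographically_smaller_subsequence_of_size_k_alt, if_pos hedge]
    rw [pvGreedy, if_pos hedge]
  · have hk0 : 0 < k := by omega
    have hkn : k ≤ (arr.length : Int) := by omega
    have hkk : k.toNat ≤ arr.length := by omega
    rw [find_lexicographically_smaller_subsequence_of_size_k_alt, if_neg hedge]
    show ((List.range k.toNat).foldl
        (pvStepB arr arr.length k.toNat
          (List.range arr.length :: pvBuildLevels arr arr.length (List.range arr.length) 1))
        (0, [])).2 = pvGreedy arr k
    rw [show List.range k.toNat = List.range' 0 k.toNat from List.range_eq_range']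
    rw [pvLoop arr k.toNat hkk k.toNat 0 0 [] (by omega) (by omega)]
    rw [List.drop_zero, List.nil_append]
    congr 1
    omega

-- ===== VERDICT (by name: the statement is the Claim_ definition above) =====
theorem find_lexicographically_smaller_subsequence_of_size_k_spec : Claim_equal_find_lexicographically_smaller_subsequence_of_size_k := by
  intro arr k _
  exact (pvMain arr.length arr k le_rfl).trans (pvAltEq arr k).symm
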